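-- pv_equiv track=rewrite | github.com/JoshHumpherey/cracking_the_coding_interview | ch16/16_21.py | brute_force_sum
-- ===== SOURCE A (Python) =====
-- l1 = [4,1,2,1,1,2]
--
-- l2 = [3,6,3,3]
--
-- def compute_list_sum(a_list):
--     total = 0
--     for i in range(len(a_list)):
--         total += a_list[i]
--     return total
--
-- def brute_force_sum(l1, l2):
--     sum1 = compute_list_sum(l1)
--     sum2 = compute_list_sum(l2)
--     for elem1 in l1:
--         for elem2 in l2:
--             new_sum1 = sum1-elem1+elem2
--             new_sum2 = sum2-elem2+elem1
--             if new_sum1 == new_sum2: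
--                 return [elem1, elem2]
--     return None
-- ===== SOURCE B (Python) =====
-- def brute_force_sum(l1, l2):
--     # A swap (e1, e2) equalises the sums iff 2*(e2 - e1) == sum(l2) - sum(l1).
--     diff = sum(l2) - sum(l1)
--     if diff % 2 != 0:
--         return None
--     half = diff // 2
--     values = set(l2)
--     for e1 in l1:
--         if e1 + half in values:
--             return [e1, e1 + half]
--     return None
-- ===== Notes on version B (the rewrite author's own statement) =====
-- stated objective: faster
-- what changed: Replaces the nested O(n*m) pair scan with the sum-difference identity: the required partner is elem1 + (sum2-sum1)/2, looked up in a hash set of l2 built once (odd difference short-circuits to None).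
import Mathlib
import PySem

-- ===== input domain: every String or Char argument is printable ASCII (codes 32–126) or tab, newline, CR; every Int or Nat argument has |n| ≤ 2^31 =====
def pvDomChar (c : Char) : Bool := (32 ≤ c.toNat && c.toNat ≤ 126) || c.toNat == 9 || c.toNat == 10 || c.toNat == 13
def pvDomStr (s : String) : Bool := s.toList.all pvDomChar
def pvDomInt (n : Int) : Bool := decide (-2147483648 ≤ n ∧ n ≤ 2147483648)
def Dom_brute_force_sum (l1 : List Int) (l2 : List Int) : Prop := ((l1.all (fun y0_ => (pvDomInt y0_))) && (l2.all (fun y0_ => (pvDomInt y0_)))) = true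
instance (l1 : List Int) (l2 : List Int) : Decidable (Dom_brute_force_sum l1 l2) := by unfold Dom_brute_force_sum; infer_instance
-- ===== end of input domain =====

-- B replaces A's nested O(n*m) pair scan with the sum-difference identity (partner = elem1 + (sum2-sum1)/2)
-- looked up in a set of l2 built once; proved equal on all inputs.


-- ===== PORT A =====
-- compute_list_sum: total = 0; for i in range(len(a_list)): total += a_list[i]
def compute_list_sum (a_list : List Int) : Int :=
  (PySem.List.pyRange 0 (a_list.length : Int) 1).foldl
    (fun total i => total + PySem.List.pyGetD a_list i 0) 0

-- inner loop: for elem2 in l2: … return [elem1, elem2] on first hit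
def bfsInner (sum1 sum2 elem1 : Int) : List Int → Option (List Int)
  | [] => none
  | elem2 :: rest =>
      if sum1 - elem1 + elem2 = sum2 - elem2 + elem1 then some [elem1, elem2]
      else bfsInner sum1 sum2 elem1 rest

-- outer loop: for elem1 in l1
def bfsOuter (sum1 sum2 : Int) (l2 : List Int) : List Int → Option (List Int)
  | [] => none
  | elem1 :: rest =>
      match bfsInner sum1 sum2 elem1 l2 with
      | some r => some r
      | none => bfsOuter sum1 sum2 l2 rest

def brute_force_sum (l1 : List Int) (l2 : List Int) : Option (List Int) :=
  bfsOuter (compute_list_sum l1) (compute_list_sum l2) l2 l1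

-- ===== PORT B =====
-- for e1 in l1: if e1 + half in values: return [e1, e1 + half]
def altLoop (half : Int) (values : PySem.Set Int) : List Int → Option (List Int)
  | [] => none
  | e1 :: rest =>
      if PySem.Set.contains values (e1 + half) then some [e1, e1 + half]
      else altLoop half values rest

def brute_force_sum_alt (l1 : List Int) (l2 : List Int) : Option (List Int) :=
  let diff := l2.sum - l1.sum
  if PySem.Int.mod diff 2 ≠ 0 then none
  else altLoop (PySem.Int.floordiv diff 2) (PySem.Set.ofList l2) l1

-- ===== PRECONDITION & SPEC =====
def Spec_brute_force_sum (l1 : List Int) (l2 : List Int) (out : Option (List Int)) : Prop := out = brute_force_sum_alt l1 l2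
instance (l1 : List Int) (l2 : List Int) (out : Option (List Int)) : Decidable (Spec_brute_force_sum l1 l2 out) := by unfold Spec_brute_force_sum; infer_instance

-- ===== CLAIM (what is proved, stated in full; the proofs are below) =====
def Claim_equal_brute_force_sum : Prop := ∀ (l1 : List Int) (l2 : List Int), Dom_brute_force_sum l1 l2 → Spec_brute_force_sum l1 l2 (brute_force_sum l1 l2)

-- ===== LEMMAS AND PROOFS =====

theorem compute_list_sum_eq (xs : List Int) : compute_list_sum xs = xs.sum := by
  unfold compute_list_sum
  rw [PySem.List.foldl_pyRange_zero_pyGetD' xs 0 (fun total x => total + x) 0,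
      PySem.List.foldl_add (g := fun x => x)]
  simp

-- if the sum difference is odd, the inner loop never fires
theorem bfsInner_none_of_odd (s1 s2 e1 : Int) (h : ¬ (2 ∣ s2 - s1)) (l : List Int) :
    bfsInner s1 s2 e1 l = none := by
  induction l with
  | nil => rfl
  | cons e2 rest ih =>
      unfold bfsInner
      rw [if_neg, ih]
      intro heq
      exact h ⟨e2 - e1, by omega⟩

-- if the difference is even with half h2, the inner loop is a membership test for e1 + h2
theorem bfsInner_even (s1 s2 e1 h2 : Int) (h : s2 - s1 = 2 * h2) (l : List Int) :
    bfsInner s1 s2 e1 l = if (e1 + h2) ∈ l then some [e1, e1 + h2] else none := by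
  induction l with
  | nil => rfl
  | cons e2 rest ih =>
      unfold bfsInner
      by_cases hc : s1 - e1 + e2 = s2 - e2 + e1
      · have : e2 = e1 + h2 := by omega
        subst this
        simp [hc]
      · have hne : e1 + h2 ≠ e2 := by intro he; apply hc; omega
        rw [if_neg hc, ih]
        simp [hne]

-- A's outer loop with an even sum difference is B's membership loop
theorem bfsOuter_even (s1 s2 h2 : Int) (h : s2 - s1 = 2 * h2) (l2 : List Int) (l : List Int) :
    bfsOuter s1 s2 l2 l = altLoop h2 (PySem.Set.ofList l2) l := by
  induction l with
  | nil => rfl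
  | cons e1 rest ih =>
      unfold bfsOuter altLoop
      rw [bfsInner_even _ _ _ h2 h]
      by_cases hm : (e1 + h2) ∈ l2
      · simp [hm]
      · simp [hm, ih]

-- A's outer loop with an odd sum difference returns None
theorem bfsOuter_odd (s1 s2 : Int) (h : ¬ (2 ∣ s2 - s1)) (l2 : List Int) (l : List Int) :
    bfsOuter s1 s2 l2 l = none := by
  induction l with
  | nil => rfl
  | cons e1 rest ih =>
      unfold bfsOuter
      rw [bfsInner_none_of_odd _ _ _ h, ih]

-- ===== VERDICT (by name: the statement is the Claim_ definition above) =====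
theorem brute_force_sum_spec : Claim_equal_brute_force_sum := by
  intro l1 l2 _
  unfold Spec_brute_force_sum brute_force_sum brute_force_sum_alt
  rw [compute_list_sum_eq, compute_list_sum_eq]
  by_cases hpar : PySem.Int.mod (l2.sum - l1.sum) 2 = 0
  · have hdvd : 2 ∣ l2.sum - l1.sum := (PySem.Int.mod_eq_zero_iff_dvd _ _).mp hpar
    obtain ⟨h2, hh2⟩ := hdvd
    have hfd : PySem.Int.floordiv (l2.sum - l1.sum) 2 = h2 :=
      (PySem.Int.floordiv_eq_iff_of_pos (by omega)).mpr ⟨by omega, by omega⟩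
    simp only [hpar, if_neg (by simp : ¬ ((0:Int) ≠ 0)), hfd]
    exact bfsOuter_even _ _ h2 hh2 l2 l1
  · have hndvd : ¬ (2 ∣ l2.sum - l1.sum) := fun h => hpar ((PySem.Int.mod_eq_zero_iff_dvd _ _).mpr h)
    simp only [if_pos hpar]
    exact bfsOuter_odd _ _ hndvd l2 l1
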